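-- pv_equiv track=rewrite | github.com/anilgursahani/bitesofpy | 180/names.py | group_names_by_country
-- ===== SOURCE A (Python) =====
-- from collections import defaultdict
--
-- data = """last_name,first_name,country_code
-- Watsham,Husain,ID
-- Harrold,Alphonso,BR
-- Apdell,Margo,CN
-- Tomblings,Deerdre,RU
-- Wasielewski,Sula,ID
-- Jeffry,Rudolph,TD
-- Brenston,Luke,SE
-- Parrett,Ines,CN
-- Braunle,Kermit,PL
-- Halbard,Davie,CN"""
--
-- def createCountriesListFromData(data):
--     personsCountryData = data.splitlines(keepends=False)
--     personsCountryData = personsCountryData[1:]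
--
--
--     for personData in personsCountryData:
--         yield personData
--
-- def group_names_by_country(data: str = data) -> defaultdict:
--
--     countries = defaultdict(list)
--     personsCountryData = createCountriesListFromData(data)
--     for personData in personsCountryData:
--         lastname,firstname,country = personData.split(",")
--         name = f'{firstname} {lastname}'
--         countries[country].append(name)
--     return countries
-- ===== SOURCE B (Python) =====
-- from collections import defaultdict
--
-- data = """last_name,first_name,country_code
-- Watsham,Husain,ID
-- Harrold,Alphonso,BR
-- Apdell,Margo,CN
-- Tomblings,Deerdre,RU
-- Wasielewski,Sula,ID
-- Jeffry,Rudolph,TD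
-- Brenston,Luke,SE
-- Parrett,Ines,CN
-- Braunle,Kermit,PL
-- Halbard,Davie,CN"""
--
-- def group_names_by_country(data: str = data) -> defaultdict:
--     # Build the (country, name) pairs first, then one filter pass per distinct country.
--     pairs = [(country, f'{first} {last}')
--              for last, first, country in (line.split(",") for line in data.splitlines()[1:])]
--     countries = defaultdict(list)
--     for c in dict.fromkeys(country for country, _ in pairs):
--         countries[c] = [name for country, name in pairs if country == c]
--     return countries
-- ===== Notes on version B (the rewrite author's own statement) =====
-- stated objective: alternative
-- what changed: B first materialises the list of (country, name) pairs, then builds each country's group with one filter pass per distinct country (dict.fromkeys for first-occurrence order), instead of A's generator plus per-line defaultdict append.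
import Mathlib
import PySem

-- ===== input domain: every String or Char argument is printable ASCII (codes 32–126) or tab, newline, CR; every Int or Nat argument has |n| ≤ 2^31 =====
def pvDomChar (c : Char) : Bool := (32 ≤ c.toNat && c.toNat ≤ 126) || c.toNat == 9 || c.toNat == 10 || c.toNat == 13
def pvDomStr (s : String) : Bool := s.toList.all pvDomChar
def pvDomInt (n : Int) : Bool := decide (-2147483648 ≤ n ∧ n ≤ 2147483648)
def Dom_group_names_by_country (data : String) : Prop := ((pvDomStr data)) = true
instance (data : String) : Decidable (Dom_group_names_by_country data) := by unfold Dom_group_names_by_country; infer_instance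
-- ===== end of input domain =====

-- B replaces A's per-line defaultdict append with a pair list + one filter pass per distinct country; return value only (A returns a defaultdict, compared as an assoc list).

-- ===== PORT A =====
-- s.split(",") (sep nonempty, so split? always returns a list)
def pvSplit (s : String) : List String := (PySem.Str.split? s ",").getD []

-- createCountriesListFromData: splitlines then drop the header line (the generator just yields them)
def createCountriesListFromData (data : String) : List String :=
  (PySem.Str.splitlines data).drop 1

-- loop body: lastname,firstname,country = personData.split(","); countries[country].append(name)
-- (the non-3-way split raises ValueError in Python; such inputs are excluded by Pre_)
def group_names_by_country (data : String) : List (String × List String) :=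
  let countries :=
    (createCountriesListFromData data).foldl (fun d personData =>
      match pvSplit personData with
      | [lastname, firstname, country] =>
          d.modify country [] (· ++ [firstname ++ " " ++ lastname])
      | _ => d) PySem.Dict.empty
  countries.items

-- ===== PORT B =====
def pvSplitB (s : String) : List String := (PySem.Str.split? s ",").getD []

-- 'last, first, country = line.split(",")': the length-3 unpack (Python raises ValueError otherwise)
def pvParseLine (line : String) : String × String :=
  let parts := pvSplitB line
  if h : parts.length = 3 then
    (parts[2], parts[1] ++ " " ++ parts[0])
  else ("", "")

def group_names_by_country_alt (data : String) : List (String × List String) :=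
  let pairs := ((PySem.Str.splitlines data).drop 1).map pvParseLine
  (PySem.List.dedup (pairs.map (·.1))).map
    (fun c => (c, (pairs.filter (fun p => p.1 == c)).map (·.2)))

-- ===== PRECONDITION & SPEC =====
-- Pre_ excludes inputs where some data line does not split into exactly 3 comma fields: Python A raises ValueError there.
def Pre_group_names_by_country (data : String) : Prop :=
  ((PySem.Str.splitlines data).drop 1).all
    (fun l => ((PySem.Str.split? l ",").getD []).length == 3) = true
instance (data : String) : Decidable (Pre_group_names_by_country data) := by
  unfold Pre_group_names_by_country; infer_instance
def pvWitness_group_names_by_country : String := "h,e,r\na,b,CN\nc,d,ID\ne,f,CN"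

def Spec_group_names_by_country (data : String) (out : List (String × List String)) : Prop := out = group_names_by_country_alt data
instance (data : String) (out : List (String × List String)) : Decidable (Spec_group_names_by_country data out) := by unfold Spec_group_names_by_country; infer_instance

-- ===== CLAIM (what is proved, stated in full; the proofs are below) =====
def Claim_equal_group_names_by_country : Prop := ∀ (data : String), Dom_group_names_by_country data → Pre_group_names_by_country data → Spec_group_names_by_country data (group_names_by_country data)

-- ===== LEMMAS AND PROOFS =====

-- Under Pre_, A's fold over the raw lines is the fold of the grouping step over the parsed pairs.
theorem pv_fold_parse (ls : List String)
    (h : ∀ l ∈ ls, ((PySem.Str.split? l ",").getD []).length = 3)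
    (d : PySem.Dict String (List String)) :
    ls.foldl (fun d personData =>
      match pvSplit personData with
      | [lastname, firstname, country] =>
          d.modify country [] (· ++ [firstname ++ " " ++ lastname])
      | _ => d) d
    = (ls.map pvParseLine).foldl
        (fun d p => d.modify p.1 [] (· ++ [p.2])) d := by
  induction ls generalizing d with
  | nil => rfl
  | cons l t ih =>
    have h3 := h l (by simp)
    obtain ⟨a, b, c, hs⟩ : ∃ a b c, (PySem.Str.split? l ",").getD [] = [a, b, c] := by
      match hg : (PySem.Str.split? l ",").getD [] with
      | [a, b, c] => exact ⟨a, b, c, rfl⟩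
      | [] | [_] | [_, _] | _ :: _ :: _ :: _ :: _ => simp [hg] at h3
    simp only [List.map_cons, List.foldl_cons, pvParseLine, pvSplit, pvSplitB, hs]
    simp only [List.length_cons, List.length_nil, reduceDIte, List.getElem_cons]
    exact ih (fun l hl => h l (by simp [hl])) _

theorem group_names_by_country_spec : Claim_equal_group_names_by_country := by
  intro data _ hpre
  unfold Spec_group_names_by_country group_names_by_country group_names_by_country_alt
      createCountriesListFromData
  have h3 : ∀ l ∈ (PySem.Str.splitlines data).drop 1,
      ((PySem.Str.split? l ",").getD []).length = 3 := by
    intro l hl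
    have := List.all_eq_true.mp hpre l hl
    simpa using this
  rw [pv_fold_parse _ h3]
  set ps := ((PySem.Str.splitlines data).drop 1).map pvParseLine with hps
  set d := ps.foldl (fun d p => d.modify p.1 [] (· ++ [p.2])) PySem.Dict.empty with hd
  have hkeys : d.keys = PySem.List.dedup (ps.map (·.1)) := by
    rw [hd]
    rw [PySem.Dict.keys_foldl_modify_key ps (·.1) [] (fun _ p v => v ++ [p.2]) PySem.Dict.empty]
    simp [PySem.Dict.empty, PySem.Dict.keys, PySem.Set.update, PySem.Set.ofList]
  have hnd : d.keys.Nodup := by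
    rw [hkeys]; exact PySem.List.nodup_dedup _
  rw [PySem.Dict.items_eq_map_keys d hnd [], hkeys]
  refine List.map_congr_left (fun c _ => ?_)
  rw [hd, PySem.Dict.getD_foldl_modify_append]
  simp [PySem.Dict.empty, PySem.Dict.getD, PySem.Dict.get?]
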